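-- pv_equiv track=rewrite | github.com/Rendani-Tshishonga/browser_engineering | window.py | layout
-- ===== SOURCE A (Python) =====
-- WIDTH = 1920
--
-- HSTEP = 13
--
-- VSTEP = 18
--
-- def layout(text):
--     display_list = []
--     cursor_x, cursor_y = HSTEP, VSTEP
--     for c in text:
--         display_list.append((cursor_x, cursor_y, c))
--         cursor_x += HSTEP
--         if cursor_x >= WIDTH - HSTEP:
--             cursor_y += VSTEP
--             cursor_x = HSTEP
--     return display_list
-- ===== SOURCE B (Python) =====
-- WIDTH = 1920
--
-- HSTEP = 13
--
-- VSTEP = 18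
--
-- # Characters per line: smallest m with HSTEP*(m+1) >= WIDTH - HSTEP, i.e. ceil((WIDTH - 2*HSTEP)/HSTEP)
-- COLS = -(-(WIDTH - 2 * HSTEP) // HSTEP)
--
-- def layout(text):
--     return [(HSTEP * (i % COLS + 1), VSTEP * (i // COLS + 1), c)
--             for i, c in enumerate(text)]
-- ===== Notes on version B (the rewrite author's own statement) =====
-- stated objective: simpler
-- what changed: Replaced the running cursor with wrap-around branch by a single list comprehension computing each character's position in closed form from its index via modulo/division by the columns-per-line constant (146).
import Mathlib
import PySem

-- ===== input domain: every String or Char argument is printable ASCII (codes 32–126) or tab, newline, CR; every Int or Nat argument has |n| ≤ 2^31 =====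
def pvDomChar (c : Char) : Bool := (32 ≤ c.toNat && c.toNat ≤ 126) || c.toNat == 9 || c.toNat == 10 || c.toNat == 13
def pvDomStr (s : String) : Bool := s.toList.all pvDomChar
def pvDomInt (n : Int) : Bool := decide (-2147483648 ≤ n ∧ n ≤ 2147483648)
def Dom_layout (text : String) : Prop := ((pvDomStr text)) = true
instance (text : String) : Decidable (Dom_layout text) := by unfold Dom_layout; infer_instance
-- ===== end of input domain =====

-- B replaces A's running cursor and wrap branch by a closed-form (i % 146, i // 146)
-- list comprehension over enumerate(text); objective: simpler/idiomatic, same O(n) cost.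

def pvWIDTH : Int := 1920
def pvHSTEP : Int := 13
def pvVSTEP : Int := 18

-- ===== PORT A =====
-- running-cursor fold: state (display_list, cursor_x, cursor_y)
def layoutStep (st : List (Int × Int × String) × Int × Int) (c : Char) :
    List (Int × Int × String) × Int × Int :=
  let dl := st.1 ++ [(st.2.1, st.2.2, String.mk [c])]
  let cx := st.2.1 + pvHSTEP
  if cx ≥ pvWIDTH - pvHSTEP then (dl, pvHSTEP, st.2.2 + pvVSTEP) else (dl, cx, st.2.2)

def layout (text : String) : List (Int × Int × String) :=
  (text.toList.foldl layoutStep ([], pvHSTEP, pvVSTEP)).1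

-- ===== PORT B =====
-- COLS = -(-(WIDTH - 2*HSTEP) // HSTEP) = 146
def pvCOLS : Int := -(PySem.Int.floordiv (-(pvWIDTH - 2 * pvHSTEP)) pvHSTEP)

def layout_alt (text : String) : List (Int × Int × String) :=
  (PySem.List.enumerate text.toList).map (fun ic =>
    (pvHSTEP * (PySem.Int.mod ic.1 pvCOLS + 1),
     pvVSTEP * (PySem.Int.floordiv ic.1 pvCOLS + 1),
     String.mk [ic.2]))

-- ===== PRECONDITION & SPEC =====
def Spec_layout (text : String) (out : List (Int × Int × String)) : Prop := out = layout_alt text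
instance (text : String) (out : List (Int × Int × String)) : Decidable (Spec_layout text out) := by unfold Spec_layout; infer_instance

-- ===== CLAIM (what is proved, stated in full; the proofs are below) =====
def Claim_equal_layout : Prop := ∀ (text : String), Dom_layout text → Spec_layout text (layout text)

-- ===== LEMMAS AND PROOFS =====

theorem pvCOLS_eq : pvCOLS = 146 := by decide

theorem layout_aux (l : List Char) :
    ∀ (n : Nat) (acc : List (Int × Int × String)),
    (l.foldl layoutStep
        (acc, 13 * ((n % 146 : Nat) : Int) + 13, 18 * ((n / 146 : Nat) : Int) + 18)).1
      = acc ++ (PySem.List.enumerate l (n : Int)).map (fun ic =>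
          (pvHSTEP * (PySem.Int.mod ic.1 pvCOLS + 1),
           pvVSTEP * (PySem.Int.floordiv ic.1 pvCOLS + 1),
           String.mk [ic.2])) := by
  induction l with
  | nil => intro n acc; simp [PySem.List.enumerate_nil]
  | cons c l ih =>
    intro n acc
    have hmod : PySem.Int.mod (n : Int) pvCOLS = ((n % 146 : Nat) : Int) := by
      rw [pvCOLS_eq]; exact_mod_cast PySem.Int.mod_natCast n 146
    have hdiv : PySem.Int.floordiv (n : Int) pvCOLS = ((n / 146 : Nat) : Int) := by
      rw [pvCOLS_eq]; exact_mod_cast PySem.Int.floordiv_natCast n 146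
    rw [PySem.List.enumerate_cons]
    simp only [List.foldl_cons, List.map_cons, layoutStep]
    rw [hmod, hdiv]
    have this := ih (n + 1) (acc ++ [(13 * ((n % 146 : Nat) : Int) + 13, 18 * ((n / 146 : Nat) : Int) + 18, String.mk [c])])
    by_cases hw : n % 146 = 145
    · have h1 : (n + 1) % 146 = 0 := by omega
      have h2 : (n + 1) / 146 = n / 146 + 1 := by omega
      rw [h1, h2] at this
      have hc1 : (((0:Nat)) : Int) = 0 := by norm_num
      have hc2 : ((n / 146 + 1 : Nat) : Int) = ((n / 146 : Nat) : Int) + 1 := by push_cast; ring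
      rw [hc1, hc2] at this
      have hif : (13 * ((n % 146 : Nat) : Int) + 13 + pvHSTEP ≥ pvWIDTH - pvHSTEP) := by
        simp [pvHSTEP, pvWIDTH, hw]
      rw [if_pos hif]
      have hx : (pvHSTEP : Int) = 13 * (0:Int) + 13 := by simp [pvHSTEP]
      have hy : 18 * ((n / 146 : Nat) : Int) + 18 + pvVSTEP = 18 * (((n / 146 : Nat) : Int) + 1) + 18 := by
        simp [pvVSTEP]; ring
      rw [hx, hy, this]
      simp [pvHSTEP, pvVSTEP, hw]
      ring
    · have h1 : (n + 1) % 146 = n % 146 + 1 := by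
        have : n % 146 < 146 := Nat.mod_lt _ (by omega)
        omega
      have h2 : (n + 1) / 146 = n / 146 := by
        have : n % 146 < 146 := Nat.mod_lt _ (by omega)
        omega
      have hb : n % 146 < 145 := by
        have : n % 146 < 146 := Nat.mod_lt _ (by omega); omega
      rw [h1, h2] at this
      have hc : ((n % 146 + 1 : Nat) : Int) = ((n % 146 : Nat) : Int) + 1 := by push_cast; ring
      rw [hc] at this
      have hif : ¬ (13 * ((n % 146 : Nat) : Int) + 13 + pvHSTEP ≥ pvWIDTH - pvHSTEP) := by
        simp only [pvHSTEP, pvWIDTH, not_le]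
        have : ((n % 146 : Nat) : Int) < 145 := by exact_mod_cast hb
        omega
      rw [if_neg hif]
      have hx : 13 * ((n % 146 : Nat) : Int) + 13 + pvHSTEP = 13 * (((n % 146 : Nat) : Int) + 1) + 13 := by
        simp [pvHSTEP]; ring
      rw [hx, this]
      simp [pvHSTEP, pvVSTEP]
      exact ⟨by ring, by ring⟩

-- ===== VERDICT (by name: the statement is the Claim_ definition above) =====
theorem layout_spec : Claim_equal_layout := by
  intro text _
  unfold Spec_layout layout layout_alt
  simpa [pvHSTEP, pvVSTEP] using layout_aux text.toList 0 []
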